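-- pv_equiv track=rewrite | github.com/aprenderaleman/b2c | agents/shared/phone.py | _strip_trunk_zero_after_cc
-- ===== SOURCE A (Python) =====
-- KNOWN_COUNTRY_CODES: tuple[str, ...] = (
--     "34",  # ES
--     "41",  # CH
--     "43",  # AT
--     "44",  # UK
--     "49",  # DE
--     "51",  # PE
--     "52",  # MX
--     "53",  # CU
--     "54",  # AR
--     "55",  # BR
--     "56",  # CL
--     "57",  # CO
--     "58",  # VE
--     "502", "503", "504", "505", "506", "507",  # Central America
--     "591", "593", "595", "598",                # BO, EC, PY, UY
-- )
--
-- def _strip_trunk_zero_after_cc(digits: str, default_country: str) -> str: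
--     """If digits begin with a known country code followed by a redundant '0'
--     (the domestic trunk prefix), drop the '0'."""
--     candidates = list(KNOWN_COUNTRY_CODES) + [default_country]
--     for cc in sorted(set(candidates), key=len, reverse=True):
--         if digits.startswith(cc) and digits[len(cc):].startswith("0"):
--             # Plausibility check: what remains after stripping '0' must still
--             # be a reasonable local-number length (at least 6 digits).
--             remainder = digits[len(cc) + 1:]
--             if len(remainder) >= 6:
--                 return cc + remainder
--     return digits
-- ===== SOURCE B (Python) =====
-- KNOWN_COUNTRY_CODES: tuple[str, ...] = (
--     "34",  # ES
--     "41",  # CH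
--     "43",  # AT
--     "44",  # UK
--     "49",  # DE
--     "51",  # PE
--     "52",  # MX
--     "53",  # CU
--     "54",  # AR
--     "55",  # BR
--     "56",  # CL
--     "57",  # CO
--     "58",  # VE
--     "502", "503", "504", "505", "506", "507",  # Central America
--     "591", "593", "595", "598",                # BO, EC, PY, UY
-- )
--
--
-- def _strip_trunk_zero_after_cc(digits: str, default_country: str) -> str:
--     """Length-indexed rewrite: instead of scanning every code in a sorted list,
--     try only the distinct code widths (longest first) and look the prefix up in
--     the code set."""
--     codes = set(KNOWN_COUNTRY_CODES)
--     codes.add(default_country)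
--     for width in sorted({len(c) for c in codes}, reverse=True):
--         if len(digits) >= width + 7 and digits[width] == "0" and digits[:width] in codes:
--             return digits[:width] + digits[width + 1:]
--     return digits
-- ===== Notes on version B (the rewrite author's own statement) =====
-- stated objective: alternative
-- what changed: B replaces A's scan over the whole length-sorted candidate list (a startswith test per code) by a loop over the few distinct code widths, longest first, doing one set-membership lookup of the digit prefix per width.
import Mathlib
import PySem

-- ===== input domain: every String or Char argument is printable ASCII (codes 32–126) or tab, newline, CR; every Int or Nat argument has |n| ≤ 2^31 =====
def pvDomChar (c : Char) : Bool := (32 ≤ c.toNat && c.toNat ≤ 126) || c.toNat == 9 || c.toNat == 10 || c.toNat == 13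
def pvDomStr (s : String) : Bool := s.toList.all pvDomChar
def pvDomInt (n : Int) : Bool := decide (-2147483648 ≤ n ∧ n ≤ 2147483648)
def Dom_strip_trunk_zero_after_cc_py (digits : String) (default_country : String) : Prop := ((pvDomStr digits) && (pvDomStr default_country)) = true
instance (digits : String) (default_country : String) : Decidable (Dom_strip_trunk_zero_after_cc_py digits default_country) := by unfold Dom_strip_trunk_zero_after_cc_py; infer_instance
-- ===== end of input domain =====

-- B replaces A's scan of the whole length-sorted candidate list by a loop over the distinct
-- code widths (longest first) with one set lookup of the digit prefix per width; same results.

-- ===== PORT A =====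
-- KNOWN_COUNTRY_CODES; strings are handled on the .toList side throughout both ports
def pvKnownCodes : List (List Char) :=
  ["34".toList, "41".toList, "43".toList, "44".toList, "49".toList, "51".toList,
   "52".toList, "53".toList, "54".toList, "55".toList, "56".toList, "57".toList, "58".toList,
   "502".toList, "503".toList, "504".toList, "505".toList, "506".toList, "507".toList,
   "591".toList, "593".toList, "595".toList, "598".toList]

-- A's 'for cc in sorted(...): if ...: return ...' loop (first hit returns, else fall through)
def pvLoopA (digits : List Char) : List (List Char) → List Char
  | [] => digits
  | cc :: rest =>
    if PySem.Chars.startswith digits cc &&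
       PySem.Chars.startswith (PySem.List.slice digits (some (cc.length : Int)) none) ['0'] then
      let remainder := PySem.List.slice digits (some ((cc.length : Int) + 1)) none
      if 6 ≤ remainder.length then cc ++ remainder else pvLoopA digits rest
    else pvLoopA digits rest

def strip_trunk_zero_after_cc_py (digits : String) (default_country : String) : String :=
  let candidates : List (List Char) := pvKnownCodes ++ [default_country.toList]
  String.ofList (pvLoopA digits.toList
    (PySem.List.sorted (PySem.Set.ofList candidates) (fun cc => cc.length) true))

-- ===== PORT B =====
-- B's 'for width in ...' loop; the digits[width] == "0" test is guarded by
-- len(digits) >= width + 7 in Source B ('and' short-circuits), so the total pyGet? == some '0'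
-- comparison is exact; digits[:width] / digits[width+1:] are the nonnegative slices
-- take width / drop (width+1)
def pvLoopB (digits : List Char) (codes : PySem.Set (List Char)) : List Nat → List Char
  | [] => digits
  | w :: rest =>
    if decide (w + 7 ≤ digits.length) && (PySem.List.pyGet? digits (w : Int) == some '0') &&
       PySem.Set.contains codes (digits.take w) then
      digits.take w ++ digits.drop (w + 1)
    else pvLoopB digits codes rest

def strip_trunk_zero_after_cc_py_alt (digits : String) (default_country : String) : String :=
  let codes : PySem.Set (List Char) :=
    PySem.Set.add (PySem.Set.ofList pvKnownCodes) default_country.toList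
  let widths := PySem.List.sorted (PySem.Set.ofList (codes.map List.length)) (fun w => w) true
  String.ofList (pvLoopB digits.toList codes widths)

-- ===== PRECONDITION & SPEC =====
def Spec_strip_trunk_zero_after_cc_py (digits : String) (default_country : String) (out : String) : Prop := out = strip_trunk_zero_after_cc_py_alt digits default_country
instance (digits : String) (default_country : String) (out : String) : Decidable (Spec_strip_trunk_zero_after_cc_py digits default_country out) := by unfold Spec_strip_trunk_zero_after_cc_py; infer_instance

-- ===== CLAIM (what is proved, stated in full; the proofs are below) =====
def Claim_equal_strip_trunk_zero_after_cc_py : Prop := ∀ (digits : String) (default_country : String), Dom_strip_trunk_zero_after_cc_py digits default_country → Spec_strip_trunk_zero_after_cc_py digits default_country (strip_trunk_zero_after_cc_py digits default_country)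

-- ===== LEMMAS AND PROOFS =====

-- proof-side abbreviations
def pvTwos : List (List Char) :=
  ["34".toList, "41".toList, "43".toList, "44".toList, "49".toList, "51".toList,
   "52".toList, "53".toList, "54".toList, "55".toList, "56".toList, "57".toList, "58".toList]
def pvThrees : List (List Char) :=
  ["502".toList, "503".toList, "504".toList, "505".toList, "506".toList, "507".toList,
   "591".toList, "593".toList, "595".toList, "598".toList]

lemma pvKnown_split : pvKnownCodes = pvTwos ++ pvThrees := rfl
lemma pvTwos_len : ∀ x ∈ pvTwos, x.length = 2 := by decide
lemma pvThrees_len : ∀ x ∈ pvThrees, x.length = 3 := by decide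

def pvFull (digits cc : List Char) : Bool :=
  PySem.Chars.startswith digits cc && PySem.Chars.startswith (digits.drop cc.length) ['0'] &&
  decide (cc.length + 7 ≤ digits.length)

def pvCondB (digits : List Char) (codes : PySem.Set (List Char)) (w : Nat) : Bool :=
  decide (w + 7 ≤ digits.length) && (PySem.List.pyGet? digits (w : Int) == some '0') &&
  PySem.Set.contains codes (digits.take w)

lemma loopB_cons (digits : List Char) (codes : PySem.Set (List Char)) (w : Nat) (rest : List Nat) :
    pvLoopB digits codes (w :: rest) =
      if pvCondB digits codes w then digits.take w ++ digits.drop (w + 1)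
      else pvLoopB digits codes rest := rfl

lemma loopA_cons (digits cc : List Char) (rest : List (List Char)) :
    pvLoopA digits (cc :: rest) =
      if pvFull digits cc then cc ++ digits.drop (cc.length + 1) else pvLoopA digits rest := by
  have h1 : ((cc.length : Int) + 1) = ((cc.length + 1 : Nat) : Int) := by push_cast; ring
  simp only [pvLoopA, pvFull, h1, PySem.List.slice_from_natCast]
  have h2 : (6 ≤ (digits.drop (cc.length + 1)).length) ↔ (cc.length + 7 ≤ digits.length) := by
    simp [List.length_drop]; omega
  split_ifs with ha hb hc hd <;> simp_all
  omega

lemma singleton_prefix (c : Char) (l : List Char) : [c] <+: l ↔ l.head? = some c := by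
  cases l
  · simp
  · simp [List.cons_prefix_cons, eq_comm]

lemma zero_bridge (digits : List Char) (w : Nat) :
    PySem.Chars.startswith (digits.drop w) ['0'] = true ↔ digits[w]? = some '0' := by
  rw [PySem.Chars.startswith_iff, singleton_prefix, List.head?_drop]

lemma full_take (digits cc : List Char) (h : pvFull digits cc = true) :
    cc = digits.take cc.length := by
  simp only [pvFull, Bool.and_eq_true] at h
  exact (List.prefix_iff_eq_take.mp ((PySem.Chars.startswith_iff _ _).mp h.1.1))

lemma loopA_eq_find (digits : List Char) (l : List (List Char)) :
    pvLoopA digits l =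
      match l.find? (pvFull digits) with
      | some cc => cc ++ digits.drop (cc.length + 1)
      | none => digits := by
  induction l with
  | nil => simp [pvLoopA]
  | cons cc rest ih =>
    rw [loopA_cons]
    by_cases h : pvFull digits cc = true
    · rw [if_pos h, List.find?_cons_of_pos h]
    · rw [if_neg h, List.find?_cons_of_neg (by simpa using h), ih]

lemma find?_length_max {p : List Char → Bool} :
    ∀ (l : List (List Char)), l.Pairwise (fun a b => b.length ≤ a.length) →
      ∀ cc, l.find? p = some cc → ∀ d ∈ l, p d = true → d.length ≤ cc.length := by
  intro l
  induction l with
  | nil => intro _ cc h; simp at h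
  | cons x t ih =>
    intro hp cc h d hd hpd
    rw [List.pairwise_cons] at hp
    by_cases hx : p x = true
    · rw [List.find?_cons_of_pos hx] at h
      cases h
      rcases List.mem_cons.mp hd with rfl | hd
      · exact le_refl _
      · exact hp.1 d hd
    · rw [List.find?_cons_of_neg (by simpa using hx)] at h
      rcases List.mem_cons.mp hd with rfl | hd
      · exact absurd hpd hx
      · exact ih hp.2 cc h d hd hpd

lemma loopA_congr (digits : List Char) (l1 l2 : List (List Char))
    (h1 : l1.Pairwise (fun a b => b.length ≤ a.length))
    (h2 : l2.Pairwise (fun a b => b.length ≤ a.length))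
    (hm : ∀ x, x ∈ l1 ↔ x ∈ l2) :
    pvLoopA digits l1 = pvLoopA digits l2 := by
  rw [loopA_eq_find, loopA_eq_find]
  cases o1 : l1.find? (pvFull digits) with
  | none =>
    cases o2 : l2.find? (pvFull digits) with
    | none => rfl
    | some cc2 =>
      exfalso
      exact (List.find?_eq_none.mp o1) cc2 ((hm cc2).mpr (List.mem_of_find?_eq_some o2))
        (List.find?_some o2)
  | some cc1 =>
    cases o2 : l2.find? (pvFull digits) with
    | none =>
      exfalso
      exact (List.find?_eq_none.mp o2) cc1 ((hm cc1).mp (List.mem_of_find?_eq_some o1))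
        (List.find?_some o1)
    | some cc2 =>
      have p1 := List.find?_some o1
      have p2 := List.find?_some o2
      have m1 : cc1 ∈ l2 := (hm cc1).mp (List.mem_of_find?_eq_some o1)
      have m2 : cc2 ∈ l1 := (hm cc2).mpr (List.mem_of_find?_eq_some o2)
      have hle : cc2.length ≤ cc1.length := find?_length_max l1 h1 cc1 o1 cc2 m2 p2
      have hge : cc1.length ≤ cc2.length := find?_length_max l2 h2 cc2 o2 cc1 m1 p1
      have hlen : cc1.length = cc2.length := le_antisymm hge hle
      have e1 := full_take digits cc1 p1
      have e2 := full_take digits cc2 p2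
      have : cc1 = cc2 := by rw [e1, e2, hlen]
      simp [this]

lemma take_len (digits : List Char) (w : Nat) (h : w ≤ digits.length) :
    (digits.take w).length = w := by simp [List.length_take]; omega

lemma loopA_block (digits : List Char) (codes : PySem.Set (List Char)) (w : Nat)
    (block rest : List (List Char))
    (hlen : ∀ cc ∈ block, cc.length = w)
    (hmem : w + 7 ≤ digits.length → digits[w]? = some '0' →
      (digits.take w ∈ block ↔ PySem.Set.contains codes (digits.take w) = true)) :
    pvLoopA digits (block ++ rest) =
      if pvCondB digits codes w then digits.take w ++ digits.drop (w + 1)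
      else pvLoopA digits rest := by
  induction block with
  | nil =>
    rw [List.nil_append]
    by_cases hcb : pvCondB digits codes w = true
    · exfalso
      simp only [pvCondB, Bool.and_eq_true, decide_eq_true_iff,
        PySem.List.pyGet?_natCast, beq_iff_eq] at hcb
      have := (hmem hcb.1.1 hcb.1.2).mpr hcb.2
      simp at this
    · rw [if_neg hcb]
  | cons cc bl ih =>
    rw [List.cons_append, loopA_cons]
    by_cases hf : pvFull digits cc = true
    · have hw : cc.length = w := hlen cc (List.mem_cons_self ..)
      have hcc : cc = digits.take w := hw ▸ full_take digits cc hf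
      have hf' := hf
      simp only [pvFull, Bool.and_eq_true, decide_eq_true_iff, hw] at hf'
      have h7 : w + 7 ≤ digits.length := hf'.2
      have hz : digits[w]? = some '0' := (zero_bridge digits w).mp hf'.1.2
      have hcb : pvCondB digits codes w = true := by
        simp only [pvCondB, Bool.and_eq_true, decide_eq_true_iff,
          PySem.List.pyGet?_natCast, beq_iff_eq]
        exact ⟨⟨h7, hz⟩, (hmem h7 hz).mp (hcc ▸ List.mem_cons_self ..)⟩
      rw [if_pos hf, if_pos hcb, hw, ← hcc]
    · rw [if_neg hf]
      apply ih (fun c hc => hlen c (List.mem_cons_of_mem _ hc))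
      intro h7 hz
      have hne : digits.take w ≠ cc := by
        intro he
        apply hf
        have hw : cc.length = w := hlen cc (List.mem_cons_self ..)
        simp only [pvFull, Bool.and_eq_true, decide_eq_true_iff, hw]
        refine ⟨⟨?_, (zero_bridge digits w).mpr hz⟩, h7⟩
        rw [PySem.Chars.startswith_iff, ← he]
        exact List.take_prefix w digits
      rw [← hmem h7 hz]
      simp [List.mem_cons, hne]

lemma pvThrees_pw : pvThrees.Pairwise (fun a b : List Char => b.length ≤ a.length) := by decide
lemma pvTwos_pw : pvTwos.Pairwise (fun a b : List Char => b.length ≤ a.length) := by decide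

lemma pw_append {l1 l2 : List (List Char)}
    (h1 : l1.Pairwise (fun a b => b.length ≤ a.length))
    (h2 : l2.Pairwise (fun a b => b.length ≤ a.length))
    (hc : ∀ a ∈ l1, ∀ b ∈ l2, b.length ≤ a.length) :
    (l1 ++ l2).Pairwise (fun a b => b.length ≤ a.length) :=
  List.pairwise_append.mpr ⟨h1, h2, hc⟩

lemma contains_append_singleton (cs : List (List Char)) (k x : List Char) :
    PySem.Set.contains (cs ++ [k]) x = true ↔ x ∈ cs ∨ x = k := by
  rw [PySem.Set.contains_iff]; simp [List.mem_append]

lemma or_sh1 (P Q R : Prop) : ((P ∨ Q) ∨ R) ↔ (Q ∨ (P ∨ R)) := by tauto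
lemma or_sh2 (P Q R : Prop) : ((P ∨ Q) ∨ R) ↔ ((Q ∨ R) ∨ P) := by tauto
lemma or_sh3 (P Q R : Prop) : ((P ∨ Q) ∨ R) ↔ (R ∨ (Q ∨ P)) := by tauto

theorem pvKey (digits k : List Char) :
    pvLoopA digits (PySem.List.sorted (PySem.Set.ofList (pvKnownCodes ++ [k])) (fun cc => cc.length) true) =
    pvLoopB digits (PySem.Set.add (PySem.Set.ofList pvKnownCodes) k)
      (PySem.List.sorted (PySem.Set.ofList ((PySem.Set.add (PySem.Set.ofList pvKnownCodes) k).map List.length)) (fun w => w) true) := by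
  have hof : PySem.Set.ofList pvKnownCodes = pvKnownCodes := by decide
  have hcs : PySem.Set.ofList (pvKnownCodes ++ [k]) = PySem.Set.add pvKnownCodes k := by
    rw [PySem.Set.ofList_eq_foldl, List.foldl_append, ← PySem.Set.ofList_eq_foldl, hof]
    rfl
  rw [hof, hcs]
  by_cases hk : k ∈ pvKnownCodes
  · -- k is already a known code
    have hadd : PySem.Set.add pvKnownCodes k = pvKnownCodes := by
      simp [PySem.Set.add]; exact hk
    rw [hadd]
    have hs : PySem.List.sorted pvKnownCodes (fun cc => cc.length) true = pvThrees ++ pvTwos := by decide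
    have hwd : PySem.List.sorted (PySem.Set.ofList (pvKnownCodes.map List.length)) (fun w => w) true = [3, 2] := by decide
    rw [hs, hwd, loopB_cons, loopB_cons]
    rw [loopA_block digits pvKnownCodes 3 pvThrees pvTwos pvThrees_len ?m3]
    case m3 =>
      intro h7 _
      have hx := take_len digits 3 (by omega)
      rw [PySem.Set.contains_iff, pvKnown_split, List.mem_append]
      constructor
      · exact Or.inr
      · rintro (h | h)
        · have := pvTwos_len _ h; omega
        · exact h
    rw [show pvTwos = pvTwos ++ ([] : List (List Char)) by simp]
    rw [loopA_block digits pvKnownCodes 2 pvTwos [] pvTwos_len ?m2]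
    case m2 =>
      intro h7 _
      have hx := take_len digits 2 (by omega)
      rw [PySem.Set.contains_iff, pvKnown_split, List.mem_append]
      constructor
      · exact Or.inl
      · rintro (h | h)
        · exact h
        · have := pvThrees_len _ h; omega
    simp only [pvLoopA, pvLoopB]
  · -- k is a new code
    have hadd : PySem.Set.add pvKnownCodes k = pvKnownCodes ++ [k] := by
      simp [PySem.Set.add]
      exact hk
    rw [hadd]
    have hwof : PySem.Set.ofList ((pvKnownCodes ++ [k]).map List.length)
        = PySem.Set.add [2, 3] k.length := by
      rw [List.map_append, PySem.Set.ofList_eq_foldl, List.foldl_append,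
        ← PySem.Set.ofList_eq_foldl,
        (show PySem.Set.ofList (pvKnownCodes.map List.length) = [2, 3] by decide)]
      rfl
    have hpwA := PySem.List.sorted_pairwise_rev (pvKnownCodes ++ [k]) (fun cc => cc.length)
    have hmemA : ∀ x, x ∈ PySem.List.sorted (pvKnownCodes ++ [k]) (fun cc => cc.length) true
        ↔ x ∈ pvKnownCodes ++ [k] :=
      fun x => PySem.List.mem_sorted (pvKnownCodes ++ [k]) (fun cc => cc.length) true x
    rw [hwof]
    by_cases hn2 : k.length = 2
    · -- width 2: k joins the two-digit class
      have hws : PySem.Set.add [2, 3] k.length = [2, 3] := by rw [hn2]; decide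
      rw [hws,
        (show PySem.List.sorted ([2, 3] : List Nat) (fun w => w) true = [3, 2] by decide),
        loopB_cons, loopB_cons]
      rw [loopA_congr digits _ (pvThrees ++ (pvTwos ++ [k])) hpwA ?pw2 ?mm2]
      case pw2 =>
        refine pw_append pvThrees_pw (pw_append pvTwos_pw (List.pairwise_singleton ..) ?_) ?_
        · intro a ha b hb
          rw [List.mem_singleton] at hb
          subst hb
          have := pvTwos_len a ha
          omega
        · intro a ha b hb
          have h3 := pvThrees_len a ha
          rcases List.mem_append.mp hb with h | h
          · have := pvTwos_len b h; omega
          · rw [List.mem_singleton] at h; subst h; omega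
      case mm2 =>
        intro x
        rw [hmemA x, pvKnown_split]
        simp only [List.mem_append]
        exact or_sh1 _ _ _
      rw [loopA_block digits (pvKnownCodes ++ [k]) 3 pvThrees (pvTwos ++ [k]) pvThrees_len ?m3]
      case m3 =>
        intro h7 _
        have hx := take_len digits 3 (by omega)
        rw [contains_append_singleton, pvKnown_split, List.mem_append]
        constructor
        · exact fun h => Or.inl (Or.inr h)
        · rintro ((h | h) | h)
          · have := pvTwos_len _ h; omega
          · exact h
          · subst h; omega
      rw [show pvTwos ++ [k] = (pvTwos ++ [k]) ++ ([] : List (List Char)) by simp]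
      rw [loopA_block digits (pvKnownCodes ++ [k]) 2 (pvTwos ++ [k]) [] ?l2 ?m2]
      case l2 =>
        intro cc hcc
        rcases List.mem_append.mp hcc with h | h
        · exact pvTwos_len cc h
        · rw [List.mem_singleton] at h; subst h; exact hn2
      case m2 =>
        intro h7 _
        have hx := take_len digits 2 (by omega)
        rw [contains_append_singleton, pvKnown_split, List.mem_append, List.mem_append,
          List.mem_singleton]
        constructor
        · rintro (h | h)
          · exact Or.inl (Or.inl h)
          · exact Or.inr h
        · rintro ((h | h) | h)
          · exact Or.inl h
          · have := pvThrees_len _ h; omega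
          · exact Or.inr h
      simp only [pvLoopA, pvLoopB]
    · by_cases hn3 : k.length = 3
      · -- width 3: k joins the three-digit class
        have hws : PySem.Set.add [2, 3] k.length = [2, 3] := by rw [hn3]; decide
        rw [hws,
          (show PySem.List.sorted ([2, 3] : List Nat) (fun w => w) true = [3, 2] by decide),
          loopB_cons, loopB_cons]
        rw [loopA_congr digits _ ((pvThrees ++ [k]) ++ pvTwos) hpwA ?pw3 ?mm3]
        case pw3 =>
          refine pw_append (pw_append pvThrees_pw (List.pairwise_singleton ..) ?_) pvTwos_pw ?_
          · intro a ha b hb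
            rw [List.mem_singleton] at hb
            subst hb
            have := pvThrees_len a ha
            omega
          · intro a ha b hb
            have h2 := pvTwos_len b hb
            rcases List.mem_append.mp ha with h | h
            · have := pvThrees_len a h; omega
            · rw [List.mem_singleton] at h; subst h; omega
        case mm3 =>
          intro x
          rw [hmemA x, pvKnown_split]
          simp only [List.mem_append]
          exact or_sh2 _ _ _
        rw [loopA_block digits (pvKnownCodes ++ [k]) 3 (pvThrees ++ [k]) pvTwos ?l3 ?m3]
        case l3 =>
          intro cc hcc
          rcases List.mem_append.mp hcc with h | h
          · exact pvThrees_len cc h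
          · rw [List.mem_singleton] at h; subst h; exact hn3
        case m3 =>
          intro h7 _
          have hx := take_len digits 3 (by omega)
          rw [contains_append_singleton, pvKnown_split, List.mem_append, List.mem_append,
            List.mem_singleton]
          constructor
          · rintro (h | h)
            · exact Or.inl (Or.inr h)
            · exact Or.inr h
          · rintro ((h | h) | h)
            · have := pvTwos_len _ h; omega
            · exact Or.inl h
            · exact Or.inr h
        rw [show pvTwos = pvTwos ++ ([] : List (List Char)) by simp]
        rw [loopA_block digits (pvKnownCodes ++ [k]) 2 pvTwos [] pvTwos_len ?m2]
        case m2 =>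
          intro h7 _
          have hx := take_len digits 2 (by omega)
          rw [contains_append_singleton, pvKnown_split, List.mem_append]
          constructor
          · exact fun h => Or.inl (Or.inl h)
          · rintro ((h | h) | h)
            · exact h
            · have := pvThrees_len _ h; omega
            · subst h; omega
        simp only [pvLoopA, pvLoopB]
      · -- k.length is a new width
        have hwcf : PySem.Set.contains ([2, 3] : List Nat) k.length = false := by
          rw [Bool.eq_false_iff]
          intro h
          have h23 := (PySem.Set.contains_iff ([2, 3] : List Nat) k.length).mp h
          simp only [List.mem_cons, List.not_mem_nil, or_false] at h23
          rcases h23 with h' | h'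
          · exact hn2 h'
          · exact hn3 h'
        have hws : PySem.Set.add [2, 3] k.length = [2, 3, k.length] := by
          simp [PySem.Set.add]
          exact ⟨hn2, hn3⟩
        rw [hws]
        by_cases hbig : 4 ≤ k.length
        · -- widest class first
          have hsw : PySem.List.sorted ([2, 3, k.length] : List Nat) (fun w => w) true
              = [k.length, 3, 2] := by
            apply PySem.List.sorted_rev_eq_of_perm_of_pairwise_gt
            · exact (show ([2, 3, k.length] : List Nat).reverse = [k.length, 3, 2] from rfl) ▸
                List.reverse_perm _
            · simp [List.pairwise_cons]
              omega
          rw [hsw, loopB_cons, loopB_cons, loopB_cons]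
          rw [loopA_congr digits _ ([k] ++ (pvThrees ++ pvTwos)) hpwA ?pwb ?mmb]
          case pwb =>
            refine pw_append (List.pairwise_singleton ..)
              (pw_append pvThrees_pw pvTwos_pw ?_) ?_
            · intro a ha b hb
              have := pvThrees_len a ha
              have := pvTwos_len b hb
              omega
            · intro a ha b hb
              rw [List.mem_singleton] at ha
              subst ha
              rcases List.mem_append.mp hb with h | h
              · have := pvThrees_len b h; omega
              · have := pvTwos_len b h; omega
          case mmb =>
            intro x
            rw [hmemA x, pvKnown_split]
            simp only [List.mem_append]
            exact or_sh3 _ _ _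
          rw [loopA_block digits (pvKnownCodes ++ [k]) k.length [k] (pvThrees ++ pvTwos)
            (by intro cc hcc; rw [List.mem_singleton] at hcc; subst hcc; rfl) ?mk]
          case mk =>
            intro h7 _
            have hx := take_len digits k.length (by omega)
            rw [contains_append_singleton, pvKnown_split, List.mem_append, List.mem_singleton]
            constructor
            · exact Or.inr
            · rintro ((h | h) | h)
              · have := pvTwos_len _ h; omega
              · have := pvThrees_len _ h; omega
              · exact h
          rw [loopA_block digits (pvKnownCodes ++ [k]) 3 pvThrees pvTwos pvThrees_len ?m3]
          case m3 =>
            intro h7 _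
            have hx := take_len digits 3 (by omega)
            rw [contains_append_singleton, pvKnown_split, List.mem_append]
            constructor
            · exact fun h => Or.inl (Or.inr h)
            · rintro ((h | h) | h)
              · have := pvTwos_len _ h; omega
              · exact h
              · subst h; omega
          rw [show pvTwos = pvTwos ++ ([] : List (List Char)) by simp]
          rw [loopA_block digits (pvKnownCodes ++ [k]) 2 pvTwos [] pvTwos_len ?m2]
          case m2 =>
            intro h7 _
            have hx := take_len digits 2 (by omega)
            rw [contains_append_singleton, pvKnown_split, List.mem_append]
            constructor
            · exact fun h => Or.inl (Or.inl h)
            · rintro ((h | h) | h)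
              · exact h
              · have := pvThrees_len _ h; omega
              · subst h; omega
          simp only [pvLoopA, pvLoopB]
        · -- k.length ≤ 1: narrowest class last
          have hsmall : k.length ≤ 1 := by omega
          have hsw : PySem.List.sorted ([2, 3, k.length] : List Nat) (fun w => w) true
              = [3, 2, k.length] := by
            apply PySem.List.sorted_rev_eq_of_perm_of_pairwise_gt
            · exact (List.Perm.swap 3 2 [k.length]).symm
            · simp [List.pairwise_cons]
              omega
          rw [hsw, loopB_cons, loopB_cons, loopB_cons]
          rw [loopA_congr digits _ (pvThrees ++ (pvTwos ++ [k])) hpwA ?pws ?mms]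
          case pws =>
            refine pw_append pvThrees_pw (pw_append pvTwos_pw (List.pairwise_singleton ..) ?_) ?_
            · intro a ha b hb
              rw [List.mem_singleton] at hb
              subst hb
              have := pvTwos_len a ha
              omega
            · intro a ha b hb
              have h3 := pvThrees_len a ha
              rcases List.mem_append.mp hb with h | h
              · have := pvTwos_len b h; omega
              · rw [List.mem_singleton] at h; subst h; omega
          case mms =>
            intro x
            rw [hmemA x, pvKnown_split]
            simp only [List.mem_append]
            exact or_sh1 _ _ _
          rw [loopA_block digits (pvKnownCodes ++ [k]) 3 pvThrees (pvTwos ++ [k]) pvThrees_len ?m3]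
          case m3 =>
            intro h7 _
            have hx := take_len digits 3 (by omega)
            rw [contains_append_singleton, pvKnown_split, List.mem_append]
            constructor
            · exact fun h => Or.inl (Or.inr h)
            · rintro ((h | h) | h)
              · have := pvTwos_len _ h; omega
              · exact h
              · subst h; omega
          rw [loopA_block digits (pvKnownCodes ++ [k]) 2 pvTwos [k] pvTwos_len ?m2]
          case m2 =>
            intro h7 _
            have hx := take_len digits 2 (by omega)
            rw [contains_append_singleton, pvKnown_split, List.mem_append]
            constructor
            · exact fun h => Or.inl (Or.inl h)
            · rintro ((h | h) | h)
              · exact h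
              · have := pvThrees_len _ h; omega
              · subst h; omega
          rw [show pvLoopA digits [k] = pvLoopA digits ([k] ++ ([] : List (List Char))) by
            rw [List.append_nil]]
          rw [loopA_block digits (pvKnownCodes ++ [k]) k.length [k] []
            (by intro cc hcc; rw [List.mem_singleton] at hcc; subst hcc; rfl) ?mk]
          case mk =>
            intro h7 _
            have hx := take_len digits k.length (by omega)
            rw [contains_append_singleton, pvKnown_split, List.mem_append, List.mem_singleton]
            constructor
            · exact Or.inr
            · rintro ((h | h) | h)
              · have := pvTwos_len _ h; omega
              · have := pvThrees_len _ h; omega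
              · exact h
          simp only [pvLoopA, pvLoopB]

-- ===== VERDICT (by name: the statement is the Claim_ definition above) =====
theorem strip_trunk_zero_after_cc_py_spec : Claim_equal_strip_trunk_zero_after_cc_py := by
  intro digits default_country _
  unfold Spec_strip_trunk_zero_after_cc_py
  unfold strip_trunk_zero_after_cc_py strip_trunk_zero_after_cc_py_alt
  exact congrArg String.ofList (pvKey digits.toList default_country.toList)
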